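-- pv_equiv track=rewrite | github.com/kamil157/aoc | 2018/day11.py | part2
-- ===== SOURCE A (Python) =====
-- def power(x, y):
--     rack = x + 10
--     p = rack * y
--     p += 1955
--     p *= rack
--     p = p // 100 % 10
--     p -= 5
--     return p
--
-- def part2(sizes):
--     best = 0
--     result = (0, 0, 0)
--     t = [[0] * 301 for _ in range(301)]
--
--     for x in range(1, 301):
--         for y in range(1, 301):
--             t[y][x] = power(x, y) + t[y - 1][x] + t[y][x - 1] - t[y - 1][x - 1]
--
--     for size in sizes:
--         for x in range(1, 301 - size):
--             for y in range(1, 301 - size):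
--                 total = t[y + size][x + size] + t[y][x] - \
--                     t[y + size][x] - t[y][x + size]
--                 if total > best:
--                     best = total
--                     result = x + 1, y + 1, size
--     return result
-- ===== SOURCE B (Python) =====
-- def power(x, y):
--     rack = x + 10
--     p = rack * y
--     p += 1955
--     p *= rack
--     p = p // 100 % 10
--     p -= 5
--     return p
--
--
-- def prefix_sums(row):
--     pr = [0]
--     s = 0
--     for v in row:
--         s += v
--         pr.append(s)
--     return pr
--
--
-- def part2(sizes):
--     g = [[power(x, y) for x in range(301)] for y in range(301)]
--     best = 0
--     result = (0, 0, 0)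
--     for size in sizes:
--         if size < 1 or size > 300:
--             continue
--         # h[y][x] = sum of g[y][x+1 .. x+size], per-row sliding windows
--         h = []
--         for row in g:
--             pr = prefix_sums(row)
--             h.append([pr[x + size + 1] - pr[x + 1] for x in range(301 - size)])
--         for x in range(1, 301 - size):
--             cp = prefix_sums([hr[x] for hr in h])
--             for y in range(1, 301 - size):
--                 total = cp[y + size + 1] - cp[y + 1]
--                 if total > best:
--                     best = total
--                     result = (x + 1, y + 1, size)
--     return result
-- ===== Notes on version B (the rewrite author's own statement) =====
-- stated objective: alternative
-- what changed: A precomputes one global 301x301 summed-area table and reads each square's power by 4-corner inclusion-exclusion; B instead recomputes, per requested size, 1-D sliding-window row sums via per-row prefix sums and then a per-column prefix sum over those windows.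
import Mathlib
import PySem

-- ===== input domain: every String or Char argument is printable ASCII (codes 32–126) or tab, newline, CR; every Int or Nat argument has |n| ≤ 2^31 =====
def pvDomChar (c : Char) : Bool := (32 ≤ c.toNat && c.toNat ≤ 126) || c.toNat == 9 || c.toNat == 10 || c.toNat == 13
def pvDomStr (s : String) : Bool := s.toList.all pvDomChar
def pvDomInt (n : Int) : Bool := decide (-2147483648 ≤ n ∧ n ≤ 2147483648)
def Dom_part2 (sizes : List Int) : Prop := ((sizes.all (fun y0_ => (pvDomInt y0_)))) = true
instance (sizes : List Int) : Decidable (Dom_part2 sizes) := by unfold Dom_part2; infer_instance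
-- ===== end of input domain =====

-- B replaces A's single global 301×301 summed-area table (queried by 4-corner
-- inclusion–exclusion) with a per-size pass of 1-D sliding-window row sums and a
-- per-column prefix-sum; objective: alternative algorithm, similar cost.

-- ===== PORT A =====
def power (x y : Int) : Int :=
  let rack := x + 10
  let p := rack * y
  let p := p + 1955
  let p := p * rack
  let p := PySem.Int.mod (PySem.Int.floordiv p 100) 10
  p - 5

-- Python's mutable 301×301 list-of-lists `t`; indices are provably nonnegative and
-- in range on every access A performs inside Pre_, so plain getD/set is exact there.
def tget (t : List (List Int)) (y x : Int) : Int := (t.getD y.toNat []).getD x.toNat 0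

def tset (t : List (List Int)) (y x : Int) (v : Int) : List (List Int) :=
  t.set y.toNat ((t.getD y.toNat []).set x.toNat v)

def buildT : List (List Int) :=
  (PySem.List.pyRange 1 301 1).foldl (fun t x =>
    (PySem.List.pyRange 1 301 1).foldl (fun t y =>
      tset t y x (power x y + tget t (y-1) x + tget t y (x-1) - tget t (y-1) (x-1))) t)
    (List.replicate 301 (List.replicate 301 0))

def part2 (sizes : List Int) : Int × Int × Int :=
  let t := buildT
  (sizes.foldl (fun (st : Int × (Int × Int × Int)) size =>
    (PySem.List.pyRange 1 (301 - size) 1).foldl (fun st x =>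
      (PySem.List.pyRange 1 (301 - size) 1).foldl (fun st y =>
        let total := tget t (y + size) (x + size) + tget t y x
                     - tget t (y + size) x - tget t y (x + size)
        if total > st.1 then (total, (x + 1, y + 1, size)) else st) st) st)
    (0, (0, 0, 0))).2

-- ===== PORT B =====
-- prefix_sums: pr = [0]; s = 0; for v in row: s += v; pr.append(s)
def prefixSums (row : List Int) : List Int :=
  (row.foldl (fun (st : Int × List Int) v => (st.1 + v, st.2 ++ [st.1 + v]))
    ((0 : Int), ([0] : List Int))).2

def part2_alt (sizes : List Int) : Int × Int × Int :=
  let g := (PySem.List.pyRange 0 301 1).map (fun y =>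
    (PySem.List.pyRange 0 301 1).map (fun x => power x y))
  (sizes.foldl (fun (st : Int × (Int × Int × Int)) size =>
    if size < 1 ∨ 300 < size then st
    else
      -- h[y][x] = sum of g[y][x+1 .. x+size]; indices nonnegative and in range here
      let h := g.map (fun row =>
        let pr := prefixSums row
        (PySem.List.pyRange 0 (301 - size) 1).map (fun x =>
          pr.getD (x + size + 1).toNat 0 - pr.getD (x + 1).toNat 0))
      (PySem.List.pyRange 1 (301 - size) 1).foldl (fun st x =>
        let cp := prefixSums (h.map (fun hr => hr.getD x.toNat 0))
        (PySem.List.pyRange 1 (301 - size) 1).foldl (fun st y =>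
          let total := cp.getD (y + size + 1).toNat 0 - cp.getD (y + 1).toNat 0
          if total > st.1 then (total, (x + 1, y + 1, size)) else st) st) st)
    (0, (0, 0, 0))).2

-- ===== PRECONDITION & SPEC =====
-- Pre_ excludes lists containing a negative size: on those A raises IndexError
-- (its x-loop runs past column 300 of the table).
def Pre_part2 (sizes : List Int) : Prop := ∀ s ∈ sizes, 0 ≤ s
instance (sizes : List Int) : Decidable (Pre_part2 sizes) := by unfold Pre_part2; infer_instance

def pvWitness_part2 : List Int := [3, 0, 16]

def Spec_part2 (sizes : List Int) (out : Int × Int × Int) : Prop := out = part2_alt sizes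
instance (sizes : List Int) (out : Int × Int × Int) : Decidable (Spec_part2 sizes out) := by unfold Spec_part2; infer_instance

-- ===== CLAIM (what is proved, stated in full; the proofs are below) =====
def Claim_equal_part2 : Prop := ∀ (sizes : List Int), Dom_part2 sizes → Pre_part2 sizes → Spec_part2 sizes (part2 sizes)


-- ===== LEMMAS AND PROOFS =====

-- generic list facts
theorem pvTake_range (n k : ℕ) (h : k ≤ n) : (List.range n).take k = List.range k := by
  induction n generalizing k with
  | zero => simp_all
  | succ m ih =>
    rcases Nat.lt_or_ge k (m+1) with hk | hk
    · rw [List.range_succ, List.take_append_of_le_length (by simp; omega)]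
      exact ih k (by omega)
    · have : k = m + 1 := by omega
      simp [this]

theorem pvSum_map_range (n : ℕ) (f : ℕ → Int) :
    ((List.range n).map f).sum = ∑ i ∈ Finset.range n, f i := by
  induction n with
  | zero => simp
  | succ m ih => rw [List.range_succ, Finset.sum_range_succ]; simp [ih]

theorem pvPyRange_zero (n : ℕ) :
    PySem.List.pyRange 0 (↑n) 1 = (List.range n).map (fun k : ℕ => (k : Int)) := by
  rw [PySem.List.pyRange_one]
  have h : ((n:ℤ) - 0).toNat = n := by omega
  rw [h]
  exact List.map_congr_left (fun a _ => by ring)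

theorem pvPyRange_one (n : ℕ) :
    PySem.List.pyRange 1 (↑n + 1) 1 = (List.range n).map (fun k : ℕ => ((k : Int) + 1)) := by
  rw [PySem.List.pyRange_one]
  have h : ((n:ℤ) + 1 - 1).toNat = n := by omega
  rw [h]
  exact List.map_congr_left (fun a _ => by ring)

theorem pvGetD_map_range (n k : ℕ) (f : ℕ → Int) (d : Int) (h : k < n) :
    ((List.range n).map f).getD k d = f k :=
  PySem.List.getD_map_range f n k d h

-- prefixSums characterisation
def pvPartials : Int → List Int → List Int
  | _, [] => []
  | s, v :: r => (s + v) :: pvPartials (s + v) r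

theorem pvFoldl_partials (l : List Int) : ∀ (s : Int) (acc : List Int),
    (l.foldl (fun (st : Int × List Int) v => (st.1 + v, st.2 ++ [st.1 + v])) (s, acc)).2
      = acc ++ pvPartials s l := by
  induction l with
  | nil => intro s acc; simp [pvPartials]
  | cons v r ih =>
    intro s acc
    simp only [List.foldl_cons, pvPartials]
    rw [ih]
    simp

theorem pvPrefixSums_eq (l : List Int) : prefixSums l = 0 :: pvPartials 0 l := by
  unfold prefixSums
  rw [pvFoldl_partials]
  rfl

theorem pvPartials_getD (l : List Int) : ∀ (s : Int) (k : ℕ), k < l.length →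
    (pvPartials s l).getD k 0 = s + (l.take (k+1)).sum := by
  induction l with
  | nil => intro s k h; simp at h
  | cons v r ih =>
    intro s k h
    cases k with
    | zero => simp [pvPartials]
    | succ k' =>
      simp only [pvPartials, List.getD_cons_succ, List.take_succ_cons, List.sum_cons]
      rw [ih (s + v) k' (by simpa using h)]
      ring

theorem pvPrefixSums_getD (l : List Int) (k : ℕ) (hk : k ≤ l.length) :
    (prefixSums l).getD k 0 = (l.take k).sum := by
  rw [pvPrefixSums_eq]
  cases k with
  | zero => simp
  | succ k' =>
    simp only [List.getD_cons_succ]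
    rw [pvPartials_getD l 0 k' (by omega)]
    simp

-- the exact sums both programs compute
def pvCp (a b : ℕ) : Int := ∑ j ∈ Finset.Ioc 0 b, power ↑a ↑j
def pvSp (a b : ℕ) : Int := ∑ i ∈ Finset.Ioc 0 a, pvCp i b
def pvBk (x y s : ℕ) : Int := ∑ j ∈ Finset.Ioc y (y+s), ∑ i ∈ Finset.Ioc x (x+s), power ↑i ↑j

theorem pvCp_zero (a : ℕ) : pvCp a 0 = 0 := by simp [pvCp]
theorem pvSp_zero_right (a : ℕ) : pvSp a 0 = 0 := by simp [pvSp, pvCp_zero]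
theorem pvSp_zero_left (b : ℕ) : pvSp 0 b = 0 := by simp [pvSp]

theorem pvCp_succ (a b : ℕ) : pvCp a (b+1) = pvCp a b + power ↑a (↑b+1) := by
  unfold pvCp
  rw [Finset.sum_Ioc_succ_top (Nat.zero_le b)]
  push_cast
  ring

theorem pvSp_succ_left (a b : ℕ) : pvSp (a+1) b = pvSp a b + pvCp (a+1) b := by
  unfold pvSp
  rw [Finset.sum_Ioc_succ_top (Nat.zero_le a)]

theorem pvSp_rec (a b : ℕ) :
    pvSp (a+1) (b+1) = power (↑a+1) (↑b+1) + pvSp (a+1) b + pvSp a (b+1) - pvSp a b := by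
  have h1 := pvSp_succ_left a (b+1)
  have h2 := pvSp_succ_left a b
  have h3 := pvCp_succ (a+1) b
  push_cast at *
  linarith

-- the summed-area-table 4-corner difference is the block sum
theorem pvRect (x y s : ℕ) :
    pvSp (x+s) (y+s) + pvSp x y - pvSp (x+s) y - pvSp x (y+s) = pvBk x y s := by
  have hcol : ∀ b, pvSp (x+s) b = pvSp x b + ∑ i ∈ Finset.Ioc x (x+s), pvCp i b := by
    intro b
    unfold pvSp
    rw [← Finset.sum_Ioc_consecutive (fun i => pvCp i b) (Nat.zero_le x) (Nat.le_add_right x s)]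
  have hC : ∀ i, pvCp i (y+s) = pvCp i y + ∑ j ∈ Finset.Ioc y (y+s), power ↑i ↑j := by
    intro i
    unfold pvCp
    rw [← Finset.sum_Ioc_consecutive (fun j => power ↑i ↑j) (Nat.zero_le y) (Nat.le_add_right y s)]
  rw [hcol (y+s), hcol y]
  have h2 : ∑ i ∈ Finset.Ioc x (x+s), pvCp i (y+s)
      = (∑ i ∈ Finset.Ioc x (x+s), pvCp i y)
        + ∑ i ∈ Finset.Ioc x (x+s), ∑ j ∈ Finset.Ioc y (y+s), power ↑i ↑j := by
    rw [← Finset.sum_add_distrib]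
    exact Finset.sum_congr rfl (fun i _ => hC i)
  rw [h2, pvBk, Finset.sum_comm]
  ring
-- the table built by A
def tgetN (t : List (List Int)) (y x : ℕ) : Int := (t.getD y []).getD x 0

theorem pvTget_nat (t : List (List Int)) (y x : ℕ) : tget t ↑y ↑x = tgetN t y x := by
  simp [tget, tgetN]

theorem pvTset_nat (t : List (List Int)) (y x : ℕ) (v : Int) :
    tset t ↑y ↑x v = t.set y ((t.getD y []).set x v) := by
  simp [tset]

def pvShaped (t : List (List Int)) : Prop :=
  t.length = 301 ∧ ∀ i, i < 301 → (t.getD i []).length = 301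

theorem pvGetD_set_self' {α : Type} (l : List α) (i : ℕ) (h : i < l.length) (v : α) (d : α) :
    (l.set i v).getD i d = v := by
  simp [List.getD_eq_getElem?_getD, h]

theorem pvGetD_set_ne' {α : Type} (l : List α) (i j : ℕ) (h : i ≠ j) (v : α) (d : α) :
    (l.set i v).getD j d = l.getD j d := by
  simp [List.getD_eq_getElem?_getD, h]

theorem pvShaped_set (t : List (List Int)) (ht : pvShaped t) (y x : ℕ) (hy : y < 301) (v : Int) :
    pvShaped (t.set y ((t.getD y []).set x v)) := by
  obtain ⟨hlen, hrow⟩ := ht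
  refine ⟨by simp [hlen], ?_⟩
  intro i hi
  by_cases h : i = y
  · subst h
    rw [pvGetD_set_self' t i (by omega) _ [], List.length_set]
    exact hrow i hi
  · rw [pvGetD_set_ne' t y i (fun hh => h hh.symm) _ []]
    exact hrow i hi

theorem pvTgetN_set (t : List (List Int)) (ht : pvShaped t) (y x y' x' : ℕ)
    (hy : y < 301) (hx : x < 301) (v : Int) :
    tgetN (t.set y ((t.getD y []).set x v)) y' x'
      = if y' = y ∧ x' = x then v else tgetN t y' x' := by
  obtain ⟨hlen, hrow⟩ := ht
  unfold tgetN
  by_cases h1 : y' = y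
  · subst h1
    rw [pvGetD_set_self' t y' (by omega) _ []]
    by_cases h2 : x' = x
    · subst h2
      rw [pvGetD_set_self' _ x' (by rw [hrow y' hy]; omega) _ 0]
      simp
    · rw [pvGetD_set_ne' _ x x' (fun hh => h2 hh.symm) _ 0]
      simp [h2]
  · rw [pvGetD_set_ne' t y y' (fun hh => h1 hh.symm) _ []]
    simp [h1]

-- inner loop: fills column c, rows 1..n
theorem pvInnerFold (c : ℕ) (hc1 : 1 ≤ c) (hc2 : c ≤ 300)
    (t0 : List (List Int)) (h0 : pvShaped t0)
    (hinv : ∀ y x : ℕ, y ≤ 300 → x ≤ 300 → tgetN t0 y x = if x < c then pvSp x y else 0) :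
    ∀ n, n ≤ 300 →
    pvShaped (((List.range n).map (fun k : ℕ => ((k:Int)+1))).foldl
        (fun t y => tset t y ↑c (power ↑c y + tget t (y-1) ↑c + tget t y (↑c-1) - tget t (y-1) (↑c-1))) t0)
    ∧ ∀ y x : ℕ, y ≤ 300 → x ≤ 300 →
      tgetN (((List.range n).map (fun k : ℕ => ((k:Int)+1))).foldl
        (fun t y => tset t y ↑c (power ↑c y + tget t (y-1) ↑c + tget t y (↑c-1) - tget t (y-1) (↑c-1))) t0) y x
        = if x < c ∨ (x = c ∧ 1 ≤ y ∧ y ≤ n) then pvSp x y else 0 := by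
  intro n
  induction n with
  | zero =>
    intro _
    refine ⟨h0, ?_⟩
    intro y x hy hx
    simp only [List.range_zero, List.map_nil, List.foldl_nil]
    rw [hinv y x hy hx]
    have : (x < c ∨ (x = c ∧ 1 ≤ y ∧ y ≤ 0)) ↔ x < c := by omega
    simp only [this]
  | succ n ih =>
    intro hn1
    obtain ⟨ihS, ihV⟩ := ih (by omega)
    set tn := ((List.range n).map (fun k : ℕ => ((k:Int)+1))).foldl
        (fun t y => tset t y ↑c (power ↑c y + tget t (y-1) ↑c + tget t y (↑c-1) - tget t (y-1) (↑c-1))) t0 with htn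
    rw [List.range_succ, List.map_append, List.foldl_append]
    simp only [List.map_cons, List.map_nil, List.foldl_cons, List.foldl_nil, ← htn]
    -- the value written at row n+1, column c
    have e1 : ((n:Int) + 1 - 1) = ((n:ℕ) : Int) := by ring
    have e2 : ((n:Int) + 1) = (((n+1 : ℕ)) : Int) := by push_cast; ring
    have e3 : ((c:Int) - 1) = (((c-1 : ℕ)) : Int) := by omega
    have hvc : tget tn ((n:Int)+1-1) ↑c = pvSp c n := by
      rw [e1, pvTget_nat, ihV n c (by omega) (by omega)]
      rcases Nat.eq_zero_or_pos n with h | h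
      · subst h
        rw [if_neg (by omega), pvSp_zero_right]
      · rw [if_pos (by omega)]
    have hvb : tget tn ((n:Int)+1) ((c:Int)-1) = pvSp (c-1) (n+1) := by
      rw [e2, e3, pvTget_nat, ihV (n+1) (c-1) (by omega) (by omega)]
      rw [if_pos (by omega)]
    have hva : tget tn ((n:Int)+1-1) ((c:Int)-1) = pvSp (c-1) n := by
      rw [e1, e3, pvTget_nat, ihV n (c-1) (by omega) (by omega)]
      rw [if_pos (by omega)]
    have hval : power ↑c ((n:Int)+1) + tget tn ((n:Int)+1-1) ↑c + tget tn ((n:Int)+1) ((c:Int)-1)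
        - tget tn ((n:Int)+1-1) ((c:Int)-1) = pvSp c (n+1) := by
      rw [hvc, hvb, hva]
      have hrec := pvSp_rec (c-1) n
      have hc' : (c - 1) + 1 = c := by omega
      rw [hc'] at hrec
      have hcast : ((c-1 : ℕ) : Int) + 1 = (c : Int) := by omega
      rw [hcast] at hrec
      have hcast2 : ((n : ℕ) : Int) + 1 = (((n+1:ℕ)) : Int) := by push_cast; ring
      rw [hcast2]
      push_cast at hrec ⊢
      linarith
    rw [hval, e2, pvTset_nat]
    constructor
    · exact pvShaped_set tn ihS (n+1) c (by omega) _
    · intro y x hy hx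
      rw [pvTgetN_set tn ihS (n+1) c y x (by omega) (by omega) _]
      by_cases h : y = n+1 ∧ x = c
      · obtain ⟨h1, h2⟩ := h
        subst h1; subst h2
        rw [if_pos ⟨rfl, rfl⟩, if_pos (by omega)]
      · rw [if_neg h, ihV y x hy hx]
        by_cases hcnd : x < c ∨ (x = c ∧ 1 ≤ y ∧ y ≤ n)
        · rw [if_pos hcnd, if_pos (by omega)]
        · rw [if_neg hcnd, if_neg (by omega)]
theorem pvOuterFold :
    ∀ m, m ≤ 300 →
    pvShaped (((List.range m).map (fun k : ℕ => ((k:Int)+1))).foldl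
        (fun t x => ((List.range 300).map (fun k : ℕ => ((k:Int)+1))).foldl
          (fun t y => tset t y x (power x y + tget t (y-1) x + tget t y (x-1) - tget t (y-1) (x-1))) t)
        (List.replicate 301 (List.replicate 301 0)))
    ∧ ∀ y x : ℕ, y ≤ 300 → x ≤ 300 →
      tgetN (((List.range m).map (fun k : ℕ => ((k:Int)+1))).foldl
        (fun t x => ((List.range 300).map (fun k : ℕ => ((k:Int)+1))).foldl
          (fun t y => tset t y x (power x y + tget t (y-1) x + tget t y (x-1) - tget t (y-1) (x-1))) t)
        (List.replicate 301 (List.replicate 301 0))) y x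
        = if x ≤ m then pvSp x y else 0 := by
  intro m
  induction m with
  | zero =>
    intro _
    simp only [List.range_zero, List.map_nil, List.foldl_nil]
    constructor
    · refine ⟨by rw [List.length_replicate], ?_⟩
      intro i hi
      rw [List.getD_eq_getElem?_getD, List.getElem?_replicate, if_pos hi, Option.getD_some,
        List.length_replicate]
    · intro y x hy hx
      have hz : tgetN (List.replicate 301 (List.replicate (301:ℕ) (0:Int))) y x = 0 := by
        unfold tgetN
        simp only [List.getD_eq_getElem?_getD, List.getElem?_replicate]
        rw [if_pos (by omega : y < 301), Option.getD_some]
        simp only [List.getElem?_replicate]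
        rw [if_pos (by omega : x < 301), Option.getD_some]
      rw [hz]
      by_cases h : x ≤ 0
      · have : x = 0 := by omega
        subst this
        rw [if_pos (by omega), pvSp_zero_left]
      · rw [if_neg h]
  | succ m ih =>
    intro hm1
    obtain ⟨ihS, ihV⟩ := ih (by omega)
    rw [List.range_succ (n := m), List.map_append, List.foldl_append]
    simp only [List.map_cons, List.map_nil, List.foldl_cons, List.foldl_nil]
    have hcast : ((m:Int) + 1) = (((m+1:ℕ)) : Int) := by push_cast; ring
    rw [hcast]
    have := pvInnerFold (m+1) (by omega) (by omega) _ ihS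
      (by
        intro y x hy hx
        rw [ihV y x hy hx]
        by_cases h : x ≤ m
        · rw [if_pos h, if_pos (by omega)]
        · rw [if_neg h, if_neg (by omega)]) 300 (by omega)
    obtain ⟨hS, hV⟩ := this
    refine ⟨hS, ?_⟩
    intro y x hy hx
    rw [hV y x hy hx]
    by_cases h : x ≤ m + 1
    · rw [if_pos h]
      rcases Nat.eq_zero_or_pos y with hy0 | hy0
      · subst hy0
        by_cases hc : x < m + 1 ∨ (x = m+1 ∧ 1 ≤ (0:ℕ) ∧ (0:ℕ) ≤ 300)
        · rw [if_pos hc]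
        · rw [if_neg hc, pvSp_zero_right]
      · rw [if_pos (by omega)]
    · rw [if_neg h, if_neg (by omega)]

theorem pvBuildT (y x : ℕ) (hy : y ≤ 300) (hx : x ≤ 300) : tgetN buildT y x = pvSp x y := by
  unfold buildT
  have h301 : (301 : Int) = ((300:ℕ) : Int) + 1 := by norm_num
  rw [h301, pvPyRange_one 300]
  rw [(pvOuterFold 300 (by omega)).2 y x hy hx, if_pos hx]
-- windowed row sum evaluated
theorem pvRowWindow (s : ℕ) (hs1 : 1 ≤ s) (hs2 : s ≤ 300) (xn : ℕ) (hx : 1 ≤ xn) (hx2 : xn ≤ 300 - s)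
    (j : ℕ) (_hj : j ≤ 300) :
    ((PySem.List.pyRange 0 (301 - (s:Int)) 1).map (fun xx =>
        (prefixSums ((PySem.List.pyRange 0 301 1).map (fun ii => power ii ↑j))).getD (xx + ↑s + 1).toNat 0
        - (prefixSums ((PySem.List.pyRange 0 301 1).map (fun ii => power ii ↑j))).getD (xx + 1).toNat 0)).getD xn 0
      = ∑ i ∈ Finset.Ioc xn (xn + s), power ↑i ↑j := by
  have h301 : (301 : Int) = ((301:ℕ) : Int) := by norm_num
  have hrow : (PySem.List.pyRange 0 301 1).map (fun ii => power ii ↑j)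
      = (List.range 301).map (fun i : ℕ => power ↑i ↑j) := by
    rw [h301, pvPyRange_zero 301, List.map_map]
    rfl
  have hlen : ((List.range 301).map (fun i : ℕ => power ↑i ↑j)).length = 301 := by simp
  have hpr : ∀ k : ℕ, k ≤ 301 →
      (prefixSums ((List.range 301).map (fun i : ℕ => power ↑i ↑j))).getD k 0
        = ∑ i ∈ Finset.range k, power ↑i ↑j := by
    intro k hk
    rw [pvPrefixSums_getD _ k (by rw [hlen]; omega), ← List.map_take, pvTake_range 301 k hk,
      pvSum_map_range]
  have hsub : (301 : Int) - (s:Int) = ((301 - s : ℕ) : Int) := by omega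
  rw [hsub, pvPyRange_zero (301 - s), List.map_map]
  have hget := pvGetD_map_range (301 - s) xn
    (fun k : ℕ => (prefixSums ((PySem.List.pyRange 0 301 1).map (fun ii => power ii ↑j))).getD (((k:Int)) + ↑s + 1).toNat 0
        - (prefixSums ((PySem.List.pyRange 0 301 1).map (fun ii => power ii ↑j))).getD (((k:Int)) + 1).toNat 0) 0 (by omega)
  rw [show ((fun xx => (prefixSums ((PySem.List.pyRange 0 301 1).map (fun ii => power ii ↑j))).getD (xx + ↑s + 1).toNat 0
        - (prefixSums ((PySem.List.pyRange 0 301 1).map (fun ii => power ii ↑j))).getD (xx + 1).toNat 0) ∘ (fun k : ℕ => (k : Int)))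
      = (fun k : ℕ => (prefixSums ((PySem.List.pyRange 0 301 1).map (fun ii => power ii ↑j))).getD (((k:Int)) + ↑s + 1).toNat 0
        - (prefixSums ((PySem.List.pyRange 0 301 1).map (fun ii => power ii ↑j))).getD (((k:Int)) + 1).toNat 0) from rfl]
  rw [hget, hrow]
  beta_reduce
  have ht1 : (((xn:Int)) + ↑s + 1).toNat = xn + s + 1 := by omega
  have ht2 : (((xn:Int)) + 1).toNat = xn + 1 := by omega
  rw [ht1, ht2, hpr (xn + s + 1) (by omega), hpr (xn + 1) (by omega)]
  rw [← Finset.sum_Ico_eq_sub (fun i => power ↑i ↑j) (by omega)]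
  rw [show xn + s + 1 = (xn + s) + 1 from rfl, Finset.Ico_add_one_add_one_eq_Ioc]

-- selection-fold helpers
theorem pvFoldl_fst_mono {α : Type} (l : List α) (f : Int × (Int × Int × Int) → α → Int × (Int × Int × Int))
    (h : ∀ st a, st.1 ≤ (f st a).1) : ∀ init, init.1 ≤ (l.foldl f init).1 := by
  induction l with
  | nil => intro init; simp
  | cons a r ih =>
    intro init
    simp only [List.foldl_cons]
    exact le_trans (h init a) (ih (f init a))

theorem pvFold_noop {α : Type} (l : List α) (f : Int × (Int × Int × Int) → α → Int × (Int × Int × Int))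
    (h : ∀ st a, a ∈ l → 0 ≤ st.1 → f st a = st) :
    ∀ init, 0 ≤ init.1 → l.foldl f init = init := by
  induction l with
  | nil => intro init _; simp
  | cons a r ih =>
    intro init hinit
    simp only [List.foldl_cons]
    rw [h init a (by simp) hinit]
    exact ih (fun st b hb hst => h st b (by simp [hb]) hst) init hinit
-- the candidate totals of A and B coincide
theorem pvColTotal (s : ℕ) (hs1 : 1 ≤ s) (hs2 : s ≤ 300) (x : Int) (hx : 1 ≤ x)
    (hx2 : x ≤ 300 - (s:Int)) (k : ℕ) (hk : k ≤ 301) :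
    (prefixSums ((((PySem.List.pyRange 0 301 1).map (fun yy =>
          (PySem.List.pyRange 0 301 1).map (fun xx => power xx yy))).map (fun row =>
          (PySem.List.pyRange 0 (301 - (s:Int)) 1).map (fun xx =>
            (prefixSums row).getD (xx + ↑s + 1).toNat 0 - (prefixSums row).getD (xx + 1).toNat 0))).map
        (fun hr => hr.getD x.toNat 0))).getD k 0
      = ∑ j ∈ Finset.range k, ∑ i ∈ Finset.Ioc x.toNat (x.toNat + s), power ↑i ↑j := by
  have h301 : (301 : Int) = ((301:ℕ) : Int) := by norm_num
  have hg : (PySem.List.pyRange 0 301 1).map (fun yy =>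
        (PySem.List.pyRange 0 301 1).map (fun xx => power xx yy))
      = (List.range 301).map (fun j : ℕ => (PySem.List.pyRange 0 301 1).map (fun xx => power xx ↑j)) := by
    rw [h301, pvPyRange_zero 301, List.map_map]
    rfl
  rw [hg, List.map_map, List.map_map]
  have hcol : (List.range 301).map (((fun hr : List Int => hr.getD x.toNat 0) ∘
        (fun row => (PySem.List.pyRange 0 (301 - (s:Int)) 1).map (fun xx =>
            (prefixSums row).getD (xx + ↑s + 1).toNat 0 - (prefixSums row).getD (xx + 1).toNat 0))) ∘
          (fun j : ℕ => (PySem.List.pyRange 0 301 1).map (fun xx => power xx ↑j)))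
      = (List.range 301).map (fun j : ℕ => ∑ i ∈ Finset.Ioc x.toNat (x.toNat + s), power ↑i ↑j) := by
    apply List.map_congr_left
    intro j hjm
    have hj' : j ≤ 300 := by simpa [Nat.lt_succ_iff] using List.mem_range.mp hjm
    simp only [Function.comp]
    exact pvRowWindow s hs1 hs2 x.toNat (by omega) (by omega) j hj'
  rw [hcol]
  have hlen : ((List.range 301).map (fun j : ℕ => ∑ i ∈ Finset.Ioc x.toNat (x.toNat + s), power ↑i ↑j)).length = 301 := by simp
  rw [pvPrefixSums_getD _ k (by rw [hlen]; omega), ← List.map_take, pvTake_range 301 k hk,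
    pvSum_map_range]

theorem pvTotals (s : ℕ) (hs1 : 1 ≤ s) (hs2 : s ≤ 300) (x y : Int)
    (hx : 1 ≤ x) (hx2 : x ≤ 300 - (s:Int)) (hy : 1 ≤ y) (hy2 : y ≤ 300 - (s:Int)) :
    tget buildT (y + ↑s) (x + ↑s) + tget buildT y x - tget buildT (y + ↑s) x - tget buildT y (x + ↑s)
      = (prefixSums ((((PySem.List.pyRange 0 301 1).map (fun yy =>
            (PySem.List.pyRange 0 301 1).map (fun xx => power xx yy))).map (fun row =>
            (PySem.List.pyRange 0 (301 - (s:Int)) 1).map (fun xx =>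
              (prefixSums row).getD (xx + ↑s + 1).toNat 0 - (prefixSums row).getD (xx + 1).toNat 0))).map
          (fun hr => hr.getD x.toNat 0))).getD (y + ↑s + 1).toNat 0
        - (prefixSums ((((PySem.List.pyRange 0 301 1).map (fun yy =>
            (PySem.List.pyRange 0 301 1).map (fun xx => power xx yy))).map (fun row =>
            (PySem.List.pyRange 0 (301 - (s:Int)) 1).map (fun xx =>
              (prefixSums row).getD (xx + ↑s + 1).toNat 0 - (prefixSums row).getD (xx + 1).toNat 0))).map
          (fun hr => hr.getD x.toNat 0))).getD (y + 1).toNat 0 := by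
  set xn := x.toNat with hxn
  set yn := y.toNat with hyn
  have hxe : x = (xn : Int) := by omega
  have hye : y = (yn : Int) := by omega
  have hxb : 1 ≤ xn ∧ xn ≤ 300 - s := by omega
  have hyb : 1 ≤ yn ∧ yn ≤ 300 - s := by omega
  -- B side
  have ht1 : (y + ↑s + 1).toNat = yn + s + 1 := by omega
  have ht2 : (y + 1).toNat = yn + 1 := by omega
  rw [ht1, ht2, pvColTotal s hs1 hs2 x hx hx2 (yn + s + 1) (by omega),
    pvColTotal s hs1 hs2 x hx hx2 (yn + 1) (by omega)]
  rw [← Finset.sum_Ico_eq_sub (fun j => ∑ i ∈ Finset.Ioc xn (xn + s), power ↑i ↑j) (by omega)]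
  rw [show yn + s + 1 = (yn + s) + 1 from rfl, Finset.Ico_add_one_add_one_eq_Ioc]
  -- A side
  have hc1 : y + ↑s = ((yn + s : ℕ) : Int) := by omega
  have hc2 : x + ↑s = ((xn + s : ℕ) : Int) := by omega
  rw [hc1, hc2, hxe, hye, pvTget_nat, pvTget_nat, pvTget_nat, pvTget_nat,
    pvBuildT (yn+s) (xn+s) (by omega) (by omega), pvBuildT yn xn (by omega) (by omega),
    pvBuildT (yn+s) xn (by omega) (by omega), pvBuildT yn (xn+s) (by omega) (by omega)]
  have := pvRect xn yn s
  unfold pvBk at this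
  linarith
-- the two per-size passes, named for the final induction
def pvStepA (st : Int × (Int × Int × Int)) (size : Int) : Int × (Int × Int × Int) :=
  (PySem.List.pyRange 1 (301 - size) 1).foldl (fun st x =>
    (PySem.List.pyRange 1 (301 - size) 1).foldl (fun st y =>
      let total := tget buildT (y + size) (x + size) + tget buildT y x
                   - tget buildT (y + size) x - tget buildT y (x + size)
      if total > st.1 then (total, (x + 1, y + 1, size)) else st) st) st

def pvStepB (st : Int × (Int × Int × Int)) (size : Int) : Int × (Int × Int × Int) :=
  if size < 1 ∨ 300 < size then st
  else
    let g := (PySem.List.pyRange 0 301 1).map (fun y =>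
      (PySem.List.pyRange 0 301 1).map (fun x => power x y))
    let h := g.map (fun row =>
      let pr := prefixSums row
      (PySem.List.pyRange 0 (301 - size) 1).map (fun x =>
        pr.getD (x + size + 1).toNat 0 - pr.getD (x + 1).toNat 0))
    (PySem.List.pyRange 1 (301 - size) 1).foldl (fun st x =>
      let cp := prefixSums (h.map (fun hr => hr.getD x.toNat 0))
      (PySem.List.pyRange 1 (301 - size) 1).foldl (fun st y =>
        let total := cp.getD (y + size + 1).toNat 0 - cp.getD (y + 1).toNat 0
        if total > st.1 then (total, (x + 1, y + 1, size)) else st) st) st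

theorem pvPart2_eq_fold (sizes : List Int) :
    part2 sizes = (sizes.foldl pvStepA ((0:Int), ((0:Int), (0:Int), (0:Int)))).2 := by
  unfold part2 pvStepA
  rfl

theorem pvPart2Alt_eq_fold (sizes : List Int) :
    part2_alt sizes = (sizes.foldl pvStepB ((0:Int), ((0:Int), (0:Int), (0:Int)))).2 := by
  unfold part2_alt pvStepB
  rfl

theorem pvSelStep_mono {α : Type} (tot : α → Int) (r : α → Int × Int × Int)
    (st : Int × (Int × Int × Int)) (a : α) :
    st.1 ≤ (if tot a > st.1 then (tot a, r a) else st).1 := by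
  split
  · exact le_of_lt (by assumption)
  · exact le_refl _

theorem pvStepA_mono' (t : List (List Int)) (size : Int) (st : Int × (Int × Int × Int)) :
    st.1 ≤ ((PySem.List.pyRange 1 (301 - size) 1).foldl (fun st x =>
      (PySem.List.pyRange 1 (301 - size) 1).foldl (fun st y =>
        let total := tget t (y + size) (x + size) + tget t y x
                     - tget t (y + size) x - tget t y (x + size)
        if total > st.1 then (total, (x + 1, y + 1, size)) else st) st) st).1 := by
  apply pvFoldl_fst_mono
  intro st' x
  apply pvFoldl_fst_mono
  intro st'' y
  exact pvSelStep_mono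
    (fun y => tget t (y + size) (x + size) + tget t y x
              - tget t (y + size) x - tget t y (x + size))
    (fun y => (x + 1, y + 1, size)) st'' y

theorem pvStepA_mono (size : Int) (st : Int × (Int × Int × Int)) : st.1 ≤ (pvStepA st size).1 :=
  pvStepA_mono' buildT size st

theorem pvStep_eq (size : Int) (h0 : 0 ≤ size) :
    ∀ st : Int × (Int × Int × Int), 0 ≤ st.1 → pvStepA st size = pvStepB st size := by
  intro st hst
  by_cases hsmall : size < 1
  · -- size = 0: A's pass never beats a nonnegative best (every total is 0); B skips it
    have hz : size = 0 := by omega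
    subst hz
    unfold pvStepA pvStepB
    rw [if_pos (by norm_num)]
    apply pvFold_noop _ _ _ st hst
    intro st' x _ hst'
    apply pvFold_noop _ _ _ st' hst'
    intro st'' y _ hst''
    dsimp only
    have htot : tget buildT (y + 0) (x + 0) + tget buildT y x
        - tget buildT (y + 0) x - tget buildT y (x + 0) = 0 := by
      rw [add_zero, add_zero]
      ring
    rw [htot, if_neg (by omega)]
  · by_cases hbig : 300 < size
    · -- size > 300: A's ranges are empty; B skips
      unfold pvStepA pvStepB
      rw [if_pos (Or.inr hbig), PySem.List.pyRange_one_eq_nil (by omega)]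
      rfl
    · -- 1 ≤ size ≤ 300: same corners, equal totals
      have hs1 : 1 ≤ size.toNat := by omega
      have hs2 : size.toNat ≤ 300 := by omega
      have hsz : size = ((size.toNat : ℕ) : Int) := by omega
      rw [hsz] at *
      set s := size.toNat with hs
      unfold pvStepA pvStepB
      rw [if_neg (by omega)]
      apply PySem.List.foldl_congr_mem
      intro acc x hxmem
      obtain ⟨hx1, hx2⟩ := (PySem.List.mem_pyRange_one).mp hxmem
      apply PySem.List.foldl_congr_mem
      intro acc' y hymem
      obtain ⟨hy1, hy2⟩ := (PySem.List.mem_pyRange_one).mp hymem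
      rw [pvTotals s hs1 hs2 x y hx1 (by omega) hy1 (by omega)]

theorem pvMain : ∀ (sizes : List Int), (∀ s ∈ sizes, 0 ≤ s) →
    ∀ st : Int × (Int × Int × Int), 0 ≤ st.1 →
      sizes.foldl pvStepA st = sizes.foldl pvStepB st := by
  intro sizes
  induction sizes with
  | nil => intro _ st _; rfl
  | cons a r ih =>
    intro hpre st hst
    simp only [List.foldl_cons]
    rw [← pvStep_eq a (hpre a (by simp)) st hst]
    exact ih (fun s hs => hpre s (by simp [hs])) (pvStepA st a)
      (le_trans hst (pvStepA_mono a st))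

-- ===== VERDICT (by name: the statement is the Claim_ definition above) =====
theorem part2_spec : Claim_equal_part2 := by
  intro sizes _ hpre
  unfold Spec_part2
  rw [pvPart2_eq_fold, pvPart2Alt_eq_fold, pvMain sizes hpre _ (by norm_num)]
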